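-- pv_equiv track=rewrite | github.com/KilianSG/Connect4-Deeplearning | agents/common.py | evaluate_list
-- ===== SOURCE A (Python) =====
-- def evaluate_list(list_of_board: list, player: int, counter_player: int):
--     """
--     :param list_of_board: list of the board that needs to be checked for winning conditions
--     :param player: the player who is getting a 1 if he wins, and a -1 if he loses
--     :param counter_player: the player who is getting a -1 if he loses, and a 1 if he wins
--     :return: return 0,1 or -1 for Gamestate, and a evaluation for the board
--     """
--     evaluation = 0
--     sum = 1
--     if list_of_board == [player, player, player, player]:
--         return 1, 3200
--
--     elif list_of_board == [counter_player, counter_player, counter_player, counter_player]: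
--         return -1, -3200
--
--     elif counter_player not in list_of_board:
--         for z in list_of_board:
--             if z == player:
--                 sum *= 5
--         evaluation += sum
--
--     elif player not in list_of_board:
--         for z in list_of_board:
--             if z == counter_player:
--                 sum *= 5
--         evaluation -= sum
--     return 0, evaluation
-- ===== SOURCE B (Python) =====
-- def evaluate_list(list_of_board: list, player: int, counter_player: int):
--     # Single streaming pass with early termination: as soon as the window is
--     # seen to be mixed (both players present) the score 0,0 is settled and the
--     # rest of the list is never scanned.  Wins and the 5**k score are read off
--     # the final counter state instead of comparing against literal lists.
--     p = c = 0
--     for z in list_of_board: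
--         if z == player:
--             p += 1
--         if z == counter_player:
--             c += 1
--         if p and c:
--             return 0, 0
--     if p == 4 and len(list_of_board) == 4:
--         return 1, 3200
--     if c == 4 and len(list_of_board) == 4:
--         return -1, -3200
--     return (0, 5 ** p) if c == 0 else (0, -(5 ** c))
-- ===== Notes on version B (the rewrite author's own statement) =====
-- stated objective: alternative
-- what changed: Replaces A's four staged whole-list operations (two literal-list comparisons, two membership scans, a *=5 accumulation loop) with one streaming pass over the window that maintains two counters and terminates early the moment both players have been seen, reading wins and the 5**k score off the final counter state.
-- outside the precondition, e.g. on evaluate_list([1, 1, 1, 1], 1, 1): A returns (1, 3200), B returns (0, 0)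
import Mathlib
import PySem

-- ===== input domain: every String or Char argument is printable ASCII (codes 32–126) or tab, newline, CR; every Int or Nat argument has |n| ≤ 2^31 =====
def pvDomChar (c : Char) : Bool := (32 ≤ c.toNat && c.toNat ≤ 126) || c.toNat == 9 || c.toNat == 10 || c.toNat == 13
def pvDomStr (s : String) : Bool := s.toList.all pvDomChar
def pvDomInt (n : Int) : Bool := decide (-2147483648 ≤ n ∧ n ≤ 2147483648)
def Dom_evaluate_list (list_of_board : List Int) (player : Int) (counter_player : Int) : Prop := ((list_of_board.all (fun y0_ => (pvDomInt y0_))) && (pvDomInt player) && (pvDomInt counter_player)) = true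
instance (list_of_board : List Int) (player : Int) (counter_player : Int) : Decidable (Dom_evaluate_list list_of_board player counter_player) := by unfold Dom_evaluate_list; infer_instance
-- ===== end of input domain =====

-- B replaces A's staged whole-list scans by one streaming pass with two counters and
-- early termination on a mixed window (objective: alternative, same asymptotic cost).

-- ===== PORT A =====
def evaluate_list (list_of_board : List Int) (player : Int) (counter_player : Int) : Int × Int :=
  let evaluation : Int := 0
  let s : Int := 1
  if list_of_board = [player, player, player, player] then (1, 3200)
  else if list_of_board = [counter_player, counter_player, counter_player, counter_player] then (-1, -3200)
  else if counter_player ∉ list_of_board then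
    (0, evaluation + list_of_board.foldl (fun acc z => if z = player then acc * 5 else acc) s)
  else if player ∉ list_of_board then
    (0, evaluation - list_of_board.foldl (fun acc z => if z = counter_player then acc * 5 else acc) s)
  else (0, evaluation)

-- ===== PORT B =====
-- the loop of Source B: counters p, c, early return (0,0) once both are positive;
-- the code after the loop is the base case (n is the full list's length)
def evalAltGo (player counter_player : Int) (n : Nat) : List Int → Nat → Nat → Int × Int
  | [], p, c =>
      if p = 4 ∧ n = 4 then (1, 3200)
      else if c = 4 ∧ n = 4 then (-1, -3200)
      else if c = 0 then (0, (5 : Int) ^ p) else (0, -((5 : Int) ^ c))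
  | z :: rest, p, c =>
      let p := if z = player then p + 1 else p
      let c := if z = counter_player then c + 1 else c
      if p ≠ 0 ∧ c ≠ 0 then (0, 0)
      else evalAltGo player counter_player n rest p c

def evaluate_list_alt (list_of_board : List Int) (player : Int) (counter_player : Int) : Int × Int :=
  evalAltGo player counter_player list_of_board.length list_of_board 0 0

-- ===== PRECONDITION & SPEC =====
-- Pre_ excludes the single degenerate corner outside the two-player game domain:
-- player = counter_player with a window of four such pieces, where A's first literal
-- comparison fires accidentally (A returns (1, 3200), B returns (0, 0)).
def Pre_evaluate_list (list_of_board : List Int) (player : Int) (counter_player : Int) : Prop :=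
  ¬ (player = counter_player ∧ list_of_board = [player, player, player, player])
instance (list_of_board : List Int) (player : Int) (counter_player : Int) : Decidable (Pre_evaluate_list list_of_board player counter_player) := by unfold Pre_evaluate_list; infer_instance
def pvWitness_evaluate_list : List Int × Int × Int := ([1, 2, 0, 0], 1, 2)

def Spec_evaluate_list (list_of_board : List Int) (player : Int) (counter_player : Int) (out : Int × Int) : Prop := out = evaluate_list_alt list_of_board player counter_player
instance (list_of_board : List Int) (player : Int) (counter_player : Int) (out : Int × Int) : Decidable (Spec_evaluate_list list_of_board player counter_player out) := by unfold Spec_evaluate_list; infer_instance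

-- ===== CLAIM (what is proved, stated in full; the proofs are below) =====
def Claim_equal_evaluate_list : Prop := ∀ (list_of_board : List Int) (player : Int) (counter_player : Int), Dom_evaluate_list list_of_board player counter_player → Pre_evaluate_list list_of_board player counter_player → Spec_evaluate_list list_of_board player counter_player (evaluate_list list_of_board player counter_player)

-- ===== LEMMAS AND PROOFS =====

-- the *=5 loop computes a * 5^(count of v)
theorem pv_foldl_mul (l : List Int) (v a : Int) :
    l.foldl (fun acc z => if z = v then acc * 5 else acc) a = a * 5 ^ (l.count v) := by
  induction l generalizing a with
  | nil => simp
  | cons x t ih =>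
    by_cases hx : x = v
    · subst hx; simp [List.foldl_cons, ih, pow_succ]; ring
    · simp [List.foldl_cons, ih, hx]

theorem pv_eq4 (l : List Int) (v : Int) (hl : l.length = 4) (hc : l.count v = 4) :
    l = [v, v, v, v] := by
  have h : ∀ b ∈ l, v = b := (List.count_eq_length).1 (by omega)
  match l, hl with
  | [a, b, c, d], _ =>
    simp only [List.mem_cons, List.not_mem_nil, or_false] at h
    have ha := h a (by tauto)
    have hb := h b (by tauto)
    have hc' := h c (by tauto)
    have hd := h d (by tauto)
    simp [← ha, ← hb, ← hc', ← hd]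

-- mixed window: once each player is positive-or-coming, the loop returns (0,0)
theorem pv_go_mixed (pl cp : Int) (hne : pl ≠ cp) :
    ∀ (l : List Int) (n p c : Nat),
      ¬ (p ≠ 0 ∧ c ≠ 0) →
      (p ≠ 0 ∨ pl ∈ l) → (c ≠ 0 ∨ cp ∈ l) →
      evalAltGo pl cp n l p c = (0, 0) := by
  intro l
  induction l with
  | nil => intro n p c hinv hp hc; simp at hp hc; omega
  | cons z rest ih =>
    intro n p c hinv hp hc
    have hp' : p ≠ 0 ∨ z = pl ∨ pl ∈ rest := by
      rcases hp with h | h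
      · exact Or.inl h
      · rcases List.mem_cons.1 h with h' | h'
        · exact Or.inr (Or.inl h'.symm)
        · exact Or.inr (Or.inr h')
    have hc' : c ≠ 0 ∨ z = cp ∨ cp ∈ rest := by
      rcases hc with h | h
      · exact Or.inl h
      · rcases List.mem_cons.1 h with h' | h'
        · exact Or.inr (Or.inl h'.symm)
        · exact Or.inr (Or.inr h')
    simp only [evalAltGo]
    by_cases hzp : z = pl
    · subst hzp
      have hzc : ¬ z = cp := fun h => hne (by rw [← h])
      simp only [if_pos rfl, if_neg hzc]
      by_cases hcb : c = 0
      · subst hcb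
        simp only [ne_eq, not_true_eq_false, and_false, if_neg, not_false_eq_true,
          Nat.succ_ne_zero, ite_false]
        have hm : cp ∈ rest := by
          rcases hc' with h | h
          · omega
          · rcases h with h | h
            · exact absurd h hzc
            · exact h
        exact ih n (p + 1) 0 (by omega) (Or.inl (Nat.succ_ne_zero p)) (Or.inr hm)
      · simp [Nat.succ_ne_zero, hcb]
    · by_cases hzc : z = cp
      · subst hzc
        simp only [if_neg hzp, if_pos rfl]
        by_cases hpb : p = 0
        · subst hpb
          simp only [ne_eq, not_true_eq_false, false_and, if_neg, not_false_eq_true,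
            Nat.succ_ne_zero, ite_false]
          have hm : pl ∈ rest := by
            rcases hp' with h | h
            · omega
            · rcases h with h | h
              · exact absurd h hzp
              · exact h
          exact ih n 0 (c + 1) (by omega) (Or.inr hm) (Or.inl (Nat.succ_ne_zero c))
        · simp [Nat.succ_ne_zero, hpb]
      · simp only [if_neg hzp, if_neg hzc]
        have hpm : p ≠ 0 ∨ pl ∈ rest := by
          rcases hp' with h | h
          · exact Or.inl h
          · rcases h with h | h
            · exact absurd h hzp
            · exact Or.inr h
        have hcm : c ≠ 0 ∨ cp ∈ rest := by
          rcases hc' with h | h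
          · exact Or.inl h
          · rcases h with h | h
            · exact absurd h hzc
            · exact Or.inr h
        simp only [if_neg hinv]
        exact ih n p c hinv hpm hcm

-- counter player absent: the loop never exits early, c stays 0
theorem pv_go_cp_absent (pl cp : Int) :
    ∀ (l : List Int) (n p : Nat), cp ∉ l →
      evalAltGo pl cp n l p 0 =
        (if p + l.count pl = 4 ∧ n = 4 then ((1 : Int), (3200 : Int))
         else (0, (5 : Int) ^ (p + l.count pl))) := by
  intro l
  induction l with
  | nil => intro n p _; simp [evalAltGo]
  | cons z rest ih =>
    intro n p hcp
    have hzc : ¬ z = cp := fun h => hcp (h ▸ List.mem_cons_self)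
    have hrest : cp ∉ rest := fun h => hcp (List.mem_cons_of_mem _ h)
    by_cases hzp : z = pl
    · have hplcp : ¬ pl = cp := hzp ▸ hzc
      simp only [evalAltGo, hzp, hplcp, ite_true, ite_false, not_true_eq_false,
        and_false, List.count_cons]
      rw [ih n (p + 1) hrest]
      simp only [Nat.add_right_comm]
      split_ifs <;> simp_all <;> omega
    · simp only [evalAltGo, hzp, hzc, ite_false, and_false, List.count_cons]
      rw [ih n p hrest]
      simp [hzp]

-- player absent (but p-accumulator 0): the loop never exits early, p stays 0
theorem pv_go_pl_absent (pl cp : Int) (hne : pl ≠ cp) :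
    ∀ (l : List Int) (n c : Nat), pl ∉ l →
      evalAltGo pl cp n l 0 c =
        (if c + l.count cp = 4 ∧ n = 4 then ((-1 : Int), (-3200 : Int))
         else if c + l.count cp = 0 then (0, (1 : Int))
         else (0, -((5 : Int) ^ (c + l.count cp)))) := by
  intro l
  induction l with
  | nil => intro n c _; simp [evalAltGo]
  | cons z rest ih =>
    intro n c hpl
    have hzp : ¬ z = pl := fun h => hpl (h ▸ List.mem_cons_self)
    have hrest : pl ∉ rest := fun h => hpl (List.mem_cons_of_mem _ h)
    by_cases hzc : z = cp
    · have hcppl : ¬ cp = pl := hzc ▸ hzp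
      simp only [evalAltGo, hzc, hcppl, ite_true, ite_false, not_true_eq_false,
        false_and, List.count_cons]
      rw [ih n (c + 1) hrest]
      simp only [Nat.add_right_comm]
      split_ifs <;> simp_all <;> omega
    · simp only [evalAltGo, hzp, hzc, ite_false, false_and, List.count_cons]
      rw [ih n c hrest]
      simp [hzc]

-- degenerate pl = cp: any occurrence of v makes both counters positive at once
theorem pv_go_same_mem (v : Int) :
    ∀ (l : List Int) (n : Nat), v ∈ l → evalAltGo v v n l 0 0 = (0, 0) := by
  intro l
  induction l with
  | nil => intro n h; simp at h
  | cons z rest ih =>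
    intro n hm
    by_cases hz : z = v
    · subst hz; simp [evalAltGo]
    · have hm' : v ∈ rest := by
        rcases List.mem_cons.1 hm with h | h
        · exact absurd h.symm hz
        · exact h
      simp only [evalAltGo, if_neg hz]
      simpa using ih n hm'

-- degenerate pl = cp, v absent: counters stay 0
theorem pv_go_same_absent (v : Int) :
    ∀ (l : List Int) (n : Nat), v ∉ l → evalAltGo v v n l 0 0 = (0, 1) := by
  intro l
  induction l with
  | nil => intro n _; simp [evalAltGo]
  | cons z rest ih =>
    intro n hm
    have hz : ¬ z = v := fun h => hm (h ▸ List.mem_cons_self)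
    have hm' : v ∉ rest := fun h => hm (List.mem_cons_of_mem _ h)
    simp only [evalAltGo, if_neg hz]
    simpa using ih n hm'

-- ===== VERDICT (by name: the statement is the Claim_ definition above) =====
theorem evaluate_list_spec : Claim_equal_evaluate_list := by
  intro l pl cp _ hpre
  unfold Spec_evaluate_list evaluate_list evaluate_list_alt
  by_cases hpc : pl = cp
  · -- degenerate pl = cp: excluded corner is l = [pl,pl,pl,pl]; elsewhere both agree
    subst hpc
    have hl4 : l ≠ [pl, pl, pl, pl] := fun h => hpre ⟨rfl, h⟩
    by_cases hm : pl ∈ l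
    · rw [pv_go_same_mem pl l l.length hm]
      simp [hl4, hm]
    · rw [pv_go_same_absent pl l l.length hm]
      have hc0 : l.count pl = 0 := List.count_eq_zero.2 hm
      simp [hl4, hm, pv_foldl_mul, hc0]
  · have hne : pl ≠ cp := hpc
    by_cases h3 : cp ∈ l
    · by_cases h4 : pl ∈ l
      · -- mixed: A falls through to (0,0); B exits early with (0,0)
        have h1 : l ≠ [pl, pl, pl, pl] := by
          intro h; subst h; simp at h3; exact hne h3.symm
        have h2 : l ≠ [cp, cp, cp, cp] := by
          intro h; subst h; simp at h4; exact hne h4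
        rw [pv_go_mixed pl cp hne l l.length 0 0 (by omega) (Or.inr h4) (Or.inr h3)]
        simp [h1, h2, h3, h4]
      · -- counter present, player absent
        rw [pv_go_pl_absent pl cp hne l l.length 0 h4]
        have hc0 : l.count cp ≠ 0 := by simp [List.count_eq_zero]; exact h3
        have h1 : l ≠ [pl, pl, pl, pl] := by
          intro h; subst h; simp at h3; exact hne h3.symm
        by_cases h2 : l = [cp, cp, cp, cp]
        · subst h2; simp [hne, Ne.symm hne]
        · have h2' : ¬ (0 + l.count cp = 4 ∧ l.length = 4) := by
            rintro ⟨hcnt, hlen⟩; exact h2 (pv_eq4 l cp hlen (by omega))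
          simp [h1, h2, h3, h4, h2', hc0, pv_foldl_mul]
          exact fun hcnt hlen => h2 (pv_eq4 l cp hlen hcnt)
    · -- counter absent
      rw [pv_go_cp_absent pl cp l l.length 0 h3]
      have h2 : l ≠ [cp, cp, cp, cp] := by
        intro h; subst h; simp at h3
      by_cases h1 : l = [pl, pl, pl, pl]
      · subst h1; simp
      · have h1' : ¬ (0 + l.count pl = 4 ∧ l.length = 4) := by
          rintro ⟨hcnt, hlen⟩; exact h1 (pv_eq4 l pl hlen (by omega))
        simp [h1, h2, h3, h1', pv_foldl_mul]
        exact fun hcnt hlen => h1 (pv_eq4 l pl hlen hcnt)
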